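-- pv_equiv track=rewrite | github.com/Netflix/clove | src/training/aro_datasets.py | _get_trigrams
-- ===== SOURCE A (Python) =====
-- from collections.abc import Iterable, Iterator, Mapping, MutableMapping, Sequence
--
-- def _get_trigrams(sentence: Iterable[str]) -> list[list[str]]:
--     trigrams = []
--     trigram = []
--     for i, s in enumerate(sentence):
--         trigram.append(s)
--         if i % 3 == 2:
--             trigrams.append(trigram[:])
--             trigram = []
--     if trigram:
--         trigrams.append(trigram)
--     return trigrams
-- ===== SOURCE B (Python) =====
-- def _get_trigrams(sentence):
--     items = list(sentence)
--     return [items[i:i + 3] for i in range(0, len(items), 3)]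
-- ===== Notes on version B (the rewrite author's own statement) =====
-- stated objective: idiomatic
-- what changed: B materializes the tokens once and slices out each chunk at stride-3 start indices, instead of A's element-by-element buffering with a modulo counter and a trailing flush.
import Mathlib
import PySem

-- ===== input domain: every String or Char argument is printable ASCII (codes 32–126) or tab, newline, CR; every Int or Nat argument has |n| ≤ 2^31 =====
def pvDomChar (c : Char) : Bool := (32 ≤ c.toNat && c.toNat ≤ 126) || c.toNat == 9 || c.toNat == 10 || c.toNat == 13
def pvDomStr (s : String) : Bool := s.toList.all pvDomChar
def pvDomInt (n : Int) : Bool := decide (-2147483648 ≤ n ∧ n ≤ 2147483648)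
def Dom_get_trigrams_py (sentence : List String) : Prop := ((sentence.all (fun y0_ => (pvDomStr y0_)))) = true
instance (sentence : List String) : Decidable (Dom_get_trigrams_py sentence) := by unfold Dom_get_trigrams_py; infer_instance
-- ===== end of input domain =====

-- B replaces A's element-by-element buffering (modulo counter + trailing flush) by slicing
-- the materialized list at stride-3 start indices; objective: idiomatic, same O(n) cost.

-- ===== PORT A =====
-- loop body of A: append s to the current trigram; flush the buffer when i % 3 == 2
def pvStepA (acc : List (List String) × List String) (p : Int × String) :
    List (List String) × List String :=
  let trigram := acc.2 ++ [p.2]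
  if PySem.Int.mod p.1 3 == 2 then (acc.1 ++ [trigram], []) else (acc.1, trigram)

def get_trigrams_py (sentence : List String) : List (List String) :=
  let st := (PySem.List.enumerate sentence).foldl pvStepA ([], [])
  if st.2 = [] then st.1 else st.1 ++ [st.2]

-- ===== PORT B =====
def get_trigrams_py_alt (sentence : List String) : List (List String) :=
  let items := sentence
  (PySem.List.pyRange 0 (items.length : Int) 3).map
    (fun i => PySem.List.slice items (some i) (some (i + 3)))

-- ===== PRECONDITION & SPEC =====
def Spec_get_trigrams_py (sentence : List String) (out : List (List String)) : Prop := out = get_trigrams_py_alt sentence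
instance (sentence : List String) (out : List (List String)) : Decidable (Spec_get_trigrams_py sentence out) := by unfold Spec_get_trigrams_py; infer_instance

-- ===== CLAIM (what is proved, stated in full; the proofs are below) =====
def Claim_equal_get_trigrams_py : Prop := ∀ (sentence : List String), Dom_get_trigrams_py sentence → Spec_get_trigrams_py sentence (get_trigrams_py sentence)

-- ===== LEMMAS AND PROOFS =====

-- reference chunking both ports are proved equal to
def pvChunk3 : List String → List (List String)
  | [] => []
  | a :: b :: c :: r => [a, b, c] :: pvChunk3 r
  | r => [r]

theorem pvRange3 (n : Int) (hn : 0 ≤ n) :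
    PySem.List.pyRange 0 n 3 = (List.range ((n.toNat + 2) / 3)).map (fun k => ((3 * k : Nat) : Int)) := by
  rw [PySem.List.pyRange_of_pos 0 n (by norm_num)]
  have h : (if (0:Int) < n then ((n - 0 + 3 - 1) / 3).toNat else 0) = (n.toNat + 2) / 3 := by
    split_ifs with h <;> omega
  rw [h]
  apply List.map_congr_left
  intro k _
  push_cast
  ring

theorem pvG_eq_chunk3 (xs : List String) :
    (List.range ((xs.length + 2) / 3)).map (fun k => (xs.drop (3 * k)).take 3) = pvChunk3 xs := by
  induction xs using pvChunk3.induct with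
  | case1 => simp [pvChunk3]
  | case2 a b c r ih =>
      have hlen : ((a :: b :: c :: r).length + 2) / 3 = (r.length + 2) / 3 + 1 := by
        simp; omega
      rw [hlen, List.range_succ_eq_map, List.map_cons, List.map_map]
      simp only [pvChunk3]
      have hhead : List.take 3 (List.drop (3 * 0) (a :: b :: c :: r)) = [a, b, c] := by simp
      rw [hhead]
      have htail : List.map ((fun k => List.take 3 (List.drop (3 * k) (a :: b :: c :: r))) ∘ Nat.succ)
          (List.range ((r.length + 2) / 3)) = pvChunk3 r := by
        rw [← ih]
        apply List.map_congr_left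
        intro k _
        show List.take 3 (List.drop (3 * (k + 1)) (a :: b :: c :: r)) = List.take 3 (List.drop (3 * k) r)
        rw [show 3 * (k + 1) = 3 * k + 1 + 1 + 1 by ring]
        simp [List.drop_succ_cons]
      rw [htail]
  | case3 r h1 h2 =>
      match r, h1, h2 with
      | [a], _, _ => simp [pvChunk3, List.range_succ]
      | [a, b], _, _ => simp [pvChunk3, List.range_succ]
      | [], h1, _ => exact absurd rfl h1
      | a :: b :: c :: r, _, h2 => exact absurd rfl (h2 a b c r)

theorem pvB_eq_chunk3 (xs : List String) : get_trigrams_py_alt xs = pvChunk3 xs := by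
  show (PySem.List.pyRange 0 (xs.length : Int) 3).map
      (fun i => PySem.List.slice xs (some i) (some (i + 3))) = pvChunk3 xs
  rw [pvRange3 _ (by positivity), List.map_map, ← pvG_eq_chunk3]
  simp only [Int.toNat_natCast]
  apply List.map_congr_left
  intro k _
  simp only [Function.comp]
  rw [show ((3 * k : Nat) : Int) + 3 = ((3 * k : Nat) : Int) + ((3 : Nat) : Int) by norm_num,
      PySem.List.slice_natCast_add]

theorem pvLoopA (xs : List String) :
    ∀ (n : Int) (acc : List (List String) × List String), PySem.Int.mod n 3 = 0 → acc.2 = [] →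
    (let st := (PySem.List.enumerate xs n).foldl pvStepA acc;
     if st.2 = [] then st.1 else st.1 ++ [st.2]) = acc.1 ++ pvChunk3 xs := by
  have hmod : ∀ m : Int, PySem.Int.mod m 3 = m % 3 := fun m =>
    PySem.Int.mod_eq_emod_of_pos (by norm_num)
  induction xs using pvChunk3.induct with
  | case1 =>
      intro n acc h3 hacc
      simp [PySem.List.enumerate_nil, pvChunk3, hacc]
  | case2 a b c r ih =>
      intro n acc h3 hacc
      rw [hmod] at h3
      have p0 : ¬ (n % 3 = 2) := by omega
      have p1 : ¬ ((n + 1) % 3 = 2) := by omega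
      have p2 : (n + 1 + 1) % 3 = 2 := by omega
      simp only [PySem.List.enumerate_cons, List.foldl_cons]
      rw [show pvStepA acc (n, a) = (acc.1, [a]) by simp [pvStepA, p0, hacc]]
      rw [show pvStepA (acc.1, [a]) (n + 1, b) = (acc.1, [a, b]) by simp [pvStepA, p1]]
      rw [show pvStepA (acc.1, [a, b]) (n + 1 + 1, c) = (acc.1 ++ [[a, b, c]], []) by
        simp [pvStepA, p2]]
      have := ih (n + 1 + 1 + 1) (acc.1 ++ [[a, b, c]], []) (by rw [hmod]; omega) rfl
      simp only at this
      rw [this]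
      simp [pvChunk3]
  | case3 r h1 h2 =>
      match r, h1, h2 with
      | [], h1, _ => exact absurd rfl h1
      | [a], _, _ =>
          intro n acc h3 hacc
          rw [hmod] at h3
          have p0 : ¬ (n % 3 = 2) := by omega
          simp [PySem.List.enumerate_cons, PySem.List.enumerate_nil, pvStepA, p0, hacc,
            pvChunk3]
      | [a, b], _, _ =>
          intro n acc h3 hacc
          rw [hmod] at h3
          have p0 : ¬ (n % 3 = 2) := by omega
          have p1 : ¬ ((n + 1) % 3 = 2) := by omega
          simp [PySem.List.enumerate_cons, PySem.List.enumerate_nil, pvStepA, p0, p1, hacc,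
            pvChunk3]
      | a :: b :: c :: r, _, h2 => exact absurd rfl (h2 a b c r)

theorem pvA_eq_chunk3 (xs : List String) : get_trigrams_py xs = pvChunk3 xs := by
  have := pvLoopA xs 0 ([], []) (by decide) rfl
  simpa [get_trigrams_py] using this

-- ===== VERDICT (by name: the statement is the Claim_ definition above) =====
theorem get_trigrams_py_spec : Claim_equal_get_trigrams_py := by
  intro s _
  unfold Spec_get_trigrams_py
  rw [pvA_eq_chunk3, pvB_eq_chunk3]
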